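-- pv_equiv track=rewrite | github.com/OpportunV/adventofcode | 2018/day6.py | part_one
-- ===== SOURCE A (Python) =====
-- from collections import defaultdict
--
-- def part_one(inp):
--     x_max, x_min, y_max, y_min = get_boundaries(inp)
--
--     counter = defaultdict(int)
--
--     for i in range(x_min, x_max):
--         for j in range(y_min, y_max):
--             p = min(inp, key=lambda item: abs(item[0] - i) + abs(item[1] - j))
--             counter[p] += 1
--
--     return max(counter.values())
--
-- def get_boundaries(inp):
--     x_min = min(inp, key=lambda item: item[0])[0]
--     x_max = max(inp, key=lambda item: item[0])[0]
--     y_min = min(inp, key=lambda item: item[1])[1]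
--     y_max = max(inp, key=lambda item: item[1])[1]
--     return x_max, x_min, y_max, y_min
-- ===== SOURCE B (Python) =====
-- def part_one(inp):
--     # Point-major: each point stamps dist*n+idx over the grid; pointwise min of the
--     # stamps picks the nearest point (ties to the smallest index, like min(key=...)),
--     # then winners are tallied per point index.
--     x_min = min(p[0] for p in inp)
--     x_max = max(p[0] for p in inp)
--     y_min = min(p[1] for p in inp)
--     y_max = max(p[1] for p in inp)
--     n = len(inp)
--     ys = range(y_min, y_max)
--     best = None
--     for idx, (px, py) in enumerate(inp):
--         dy = [abs(py - j) * n + idx for j in ys]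
--         grid = [abs(px - i) * n + d for i in range(x_min, x_max) for d in dy]
--         best = grid if best is None else list(map(min, best, grid))
--     tally = [0] * n
--     for e in best:
--         tally[e % n] += 1
--     return max(tally)
-- ===== Notes on version B (the rewrite author's own statement) =====
-- stated objective: alternative
-- what changed: B is point-major instead of cell-major: each point stamps an encoded (distance*n+index) value over the whole grid and the grids are merged pointwise with min (Python min's first-minimum tie rule becomes the index tie-break of the encoding), then winners are tallied per point index; A scans every cell, picks its nearest point with min(key=...) and tallies into a defaultdict keyed by point.
-- outside the precondition, e.g. on part_one([(0, 0), (0, 3)]): A raises ValueError, B returns 0; on part_one([]): A raises ValueError, B raises ValueError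
-- crash fix: On nonempty inputs whose points all share the same x coordinate or all share the same y coordinate the grid is empty, so A raises ValueError (max() of an empty counter) while B returns 0. — e.g. on part_one([(0, 0), (0, 3)]): A raises ValueError, B returns 0
import Mathlib
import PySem

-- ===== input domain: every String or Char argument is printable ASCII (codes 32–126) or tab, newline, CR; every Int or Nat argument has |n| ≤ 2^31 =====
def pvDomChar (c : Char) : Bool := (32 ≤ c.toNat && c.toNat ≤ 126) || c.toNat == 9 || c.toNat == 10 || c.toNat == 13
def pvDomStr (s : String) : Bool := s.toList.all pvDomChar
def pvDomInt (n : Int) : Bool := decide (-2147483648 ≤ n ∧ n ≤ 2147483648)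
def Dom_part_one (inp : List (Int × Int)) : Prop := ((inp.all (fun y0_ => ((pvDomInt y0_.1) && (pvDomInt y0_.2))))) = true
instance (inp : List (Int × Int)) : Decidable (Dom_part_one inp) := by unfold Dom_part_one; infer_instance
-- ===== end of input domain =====

-- B is point-major instead of cell-major: each point stamps an encoded (distance*n+index)
-- value over the grid, grids are merged pointwise with min (the index term reproduces Python
-- min's first-minimum tie rule), winners are tallied per index; objective: alternative.

-- ===== PORT A =====
def get_boundaries (inp : List (Int × Int)) : Int × Int × Int × Int :=
  let x_min := ((PySem.List.min? inp (fun item => item.1)).getD (0, 0)).1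
  let x_max := ((PySem.List.max? inp (fun item => item.1)).getD (0, 0)).1
  let y_min := ((PySem.List.min? inp (fun item => item.2)).getD (0, 0)).2
  let y_max := ((PySem.List.max? inp (fun item => item.2)).getD (0, 0)).2
  (x_max, x_min, y_max, y_min)

def part_one (inp : List (Int × Int)) : Int :=
  let b := get_boundaries inp
  let x_max := b.1
  let x_min := b.2.1
  let y_max := b.2.2.1
  let y_min := b.2.2.2
  let counter : PySem.Dict (Int × Int) Int :=
    (PySem.List.pyRange x_min x_max 1).foldl (fun d i =>
      (PySem.List.pyRange y_min y_max 1).foldl (fun d j =>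
        let p := (PySem.List.min? inp (fun item => |item.1 - i| + |item.2 - j|)).getD (0, 0)
        d.modify p 0 (fun v => v + 1)) d) PySem.Dict.empty
  (PySem.List.max? counter.values (fun v => v)).getD 0

-- ===== PORT B =====
def part_one_alt (inp : List (Int × Int)) : Int :=
  let x_min := (PySem.List.min? (inp.map (fun p => p.1)) (fun v => v)).getD 0
  let x_max := (PySem.List.max? (inp.map (fun p => p.1)) (fun v => v)).getD 0
  let y_min := (PySem.List.min? (inp.map (fun p => p.2)) (fun v => v)).getD 0
  let y_max := (PySem.List.max? (inp.map (fun p => p.2)) (fun v => v)).getD 0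
  let n := PySem.List.len inp
  let best : Option (List Int) :=
    (PySem.List.enumerate inp 0).foldl (fun best e =>
      let dy := (PySem.List.pyRange y_min y_max 1).map (fun j => |e.2.2 - j| * n + e.1)
      let grid := (PySem.List.pyRange x_min x_max 1).flatMap
        (fun i => dy.map (fun d => |e.2.1 - i| * n + d))
      match best with
      | none => some grid
      | some b => some (List.zipWith min b grid)) none
  -- `tally[e % n] += 1`: e % n always lies in [0, n) here (n > 0 whenever best is nonempty),
  -- so the plain list update is exact
  let tally := (best.getD []).foldl (fun t e =>
      t.set (PySem.Int.mod e n).toNat (t.getD (PySem.Int.mod e n).toNat 0 + 1))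
    (List.replicate inp.length (0 : Int))
  (PySem.List.max? tally (fun v => v)).getD 0

-- ===== PRECONDITION & SPEC =====
-- Pre_ excludes inputs where A raises ValueError: the empty list (min of an empty sequence)
-- and lists whose points all share the same x or all share the same y (empty grid, max of
-- an empty counter).
def Pre_part_one (inp : List (Int × Int)) : Prop :=
  (∃ a ∈ inp, ∃ b ∈ inp, a.1 < b.1) ∧ (∃ a ∈ inp, ∃ b ∈ inp, a.2 < b.2)
instance (inp : List (Int × Int)) : Decidable (Pre_part_one inp) := by
  unfold Pre_part_one; infer_instance
def pvWitness_part_one : (List (Int × Int)) := [(0, 0), (2, 1), (1, 3)]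

-- On nonempty inputs whose points all share the same x or all share the same y the grid is
-- empty, so A raises ValueError (max of empty counter) while B returns 0.
def Raises_part_one (inp : List (Int × Int)) : Prop :=
  inp ≠ [] ∧ (¬ (∃ a ∈ inp, ∃ b ∈ inp, a.1 < b.1) ∨ ¬ (∃ a ∈ inp, ∃ b ∈ inp, a.2 < b.2))
instance (inp : List (Int × Int)) : Decidable (Raises_part_one inp) := by
  unfold Raises_part_one; infer_instance
def pvRaiseWitness_part_one : (List (Int × Int)) := [(0, 0), (0, 3)]
def pvRaiseWitnessOut_part_one : Int := 0

def Spec_part_one (inp : List (Int × Int)) (out : Int) : Prop := out = part_one_alt inp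
instance (inp : List (Int × Int)) (out : Int) : Decidable (Spec_part_one inp out) := by
  unfold Spec_part_one; infer_instance

-- ===== CLAIM (what is proved, stated in full; the proofs are below) =====
def Claim_equal_part_one : Prop := ∀ (inp : List (Int × Int)), Dom_part_one inp → Pre_part_one inp → Spec_part_one inp (part_one inp)
def Claim_raises_part_one : Prop := (∀ (inp : List (Int × Int)), Dom_part_one inp → Raises_part_one inp → ¬ Pre_part_one inp) ∧ (Dom_part_one (pvRaiseWitness_part_one) ∧ Raises_part_one (pvRaiseWitness_part_one) ∧ part_one_alt (pvRaiseWitness_part_one) = pvRaiseWitnessOut_part_one)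

-- ===== LEMMAS AND PROOFS =====

-- Manhattan key of a point q relative to a cell c
def pvKey (c q : Int × Int) : Int := |q.1 - c.1| + |q.2 - c.2|

def pvChosen (inp : List (Int × Int)) (c : Int × Int) : Int × Int :=
  (PySem.List.min? inp (fun item => pvKey c item)).getD (0, 0)

def pvCells (xmin xmax ymin ymax : Int) : List (Int × Int) :=
  (PySem.List.pyRange xmin xmax 1).flatMap
    (fun i => (PySem.List.pyRange ymin ymax 1).map (fun j => ((i, j) : Int × Int)))

-- flatten a nested fold
theorem pv_foldl_flatMap {α β γ : Type} (xs : List α) (g : α → List β) (f : γ → β → γ)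
    (a : γ) : (xs.flatMap g).foldl f a = xs.foldl (fun acc x => (g x).foldl f acc) a := by
  induction xs generalizing a with
  | nil => rfl
  | cons x t ih => simp [List.flatMap_cons, List.foldl_append, ih]

-- a conditional +1 fold is a countP
theorem pv_min?_aux {α : Type} (key : α → Int) (xs : List α) (m0 m : α)
    (h : xs.foldl (fun acc x => match acc with
        | none => some x
        | some m => if key x < key m then some x else some m) (some m0) = some m) :
    (m = m0 ∧ ∀ y ∈ xs, key m0 ≤ key y) ∨
    (∃ pre suf, xs = pre ++ m :: suf ∧ key m < key m0 ∧
      (∀ y ∈ pre, key m < key y) ∧ (∀ y ∈ suf, key m ≤ key y)) := by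
  induction xs generalizing m0 with
  | nil => left; simp_all
  | cons x t ih =>
    simp only [List.foldl_cons] at h
    by_cases hx : key x < key m0
    · simp only [hx, if_pos] at h
      rcases ih x h with ⟨rfl, hall⟩ | ⟨pre, suf, heq, hlt, hpre, hsuf⟩
      · right
        exact ⟨[], t, rfl, hx, by simp, hall⟩
      · right
        refine ⟨x :: pre, suf, by simp [heq], lt_trans hlt hx, ?_, hsuf⟩
        intro y hy
        rcases List.mem_cons.1 hy with rfl | hy
        · exact hlt
        · exact hpre y hy
    · simp only [hx, if_neg, not_false_iff] at h
      rcases ih m0 h with ⟨rfl, hall⟩ | ⟨pre, suf, heq, hlt, hpre, hsuf⟩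
      · left
        refine ⟨rfl, ?_⟩
        intro y hy
        rcases List.mem_cons.1 hy with rfl | hy
        · exact le_of_not_gt hx
        · exact hall y hy
      · right
        refine ⟨x :: pre, suf, by simp [heq], hlt, ?_, hsuf⟩
        intro y hy
        rcases List.mem_cons.1 hy with rfl | hy
        · exact lt_of_lt_of_le hlt (le_of_not_gt hx)
        · exact hpre y hy

theorem pv_min?_first {α : Type} (key : α → Int) (xs : List α) (m : α)
    (h : PySem.List.min? xs key = some m) :
    ∃ pre suf, xs = pre ++ m :: suf ∧ (∀ y ∈ pre, key m < key y) ∧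
      (∀ y ∈ suf, key m ≤ key y) := by
  cases xs with
  | nil => simp [PySem.List.min?] at h
  | cons x t =>
    have h' : t.foldl (fun acc x => match acc with
        | none => some x
        | some m => if key x < key m then some x else some m) (some x) = some m := by
      simpa [PySem.List.min?] using h
    rcases pv_min?_aux key t x m h' with ⟨rfl, hall⟩ | ⟨pre, suf, heq, hlt, hpre, hsuf⟩
    · exact ⟨[], t, rfl, by simp, hall⟩
    · refine ⟨x :: pre, suf, by simp [heq], ?_, hsuf⟩
      intro y hy
      rcases List.mem_cons.1 hy with rfl | hy
      · exact hlt
      · exact hpre y hy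

-- positions in two decompositions of the same list
theorem pv_first_idx {α : Type} [DecidableEq α] {xs : List α} {p : α} (h : p ∈ xs) :
    ∃ n : Nat, ∃ hn : n < xs.length, xs[n] = p ∧ ∀ k (hk : k < n), xs[k]'(by omega) ≠ p := by
  induction xs with
  | nil => simp at h
  | cons x t ih =>
    by_cases hx : x = p
    · exact ⟨0, by simp, hx, by omega⟩
    · rcases List.mem_cons.1 h with rfl | hmem
      · exact absurd rfl hx
      · rcases ih hmem with ⟨n, hn, hget, hbef⟩
        refine ⟨n + 1, by simpa using Nat.succ_lt_succ hn, by simpa using hget, ?_⟩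
        intro k hk
        cases k with
        | zero => simpa using hx
        | succ k => simpa using hbef k (by omega)

-- the two directions relating B's per-index test to A's chosen point
theorem pv_values_eq {κ ν : Type} [BEq κ] [LawfulBEq κ] (l : List (κ × ν)) (dflt : ν)
    (h : (l.map Prod.fst).Nodup) :
    (PySem.Dict.mk l).values = (l.map Prod.fst).map
      (fun k => (PySem.Dict.mk l).getD k dflt) := by
  induction l with
  | nil => simp [PySem.Dict.values]
  | cons kv t ih =>
    obtain ⟨k, v⟩ := kv
    simp only [List.map_cons] at h ⊢
    have hk : k ∉ t.map Prod.fst := (List.nodup_cons.1 h).1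
    have ht := (List.nodup_cons.1 h).2
    rw [PySem.Dict.values_mk]
    simp only [List.map_cons]
    congr 1
    · simp [PySem.Dict.getD, PySem.Dict.get?_mk_cons]
    · have htail : ∀ k' ∈ t.map Prod.fst,
          (PySem.Dict.mk ((k, v) :: t)).getD k' dflt = (PySem.Dict.mk t).getD k' dflt := by
        intro k' hk'
        have hne : (k == k') = false := by
          rcases List.mem_map.1 hk' with ⟨q, hq, rfl⟩
          by_contra hcon
          have hkq : k = q.1 := by
            have : (k == q.1) = true := by
              cases hb : (k == q.1)
              · exact absurd hb hcon
              · rfl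
            exact eq_of_beq this
          exact hk (hkq ▸ List.mem_map_of_mem hq)
        simp [PySem.Dict.getD, PySem.Dict.get?_mk_cons, hne]
      rw [List.map_congr_left htail]
      have := ih ht
      rw [PySem.Dict.values_mk] at this
      exact this

-- min/max over a projected list equals the projection of min?/max? with that key
theorem pv_min_map (inp : List (Int × Int)) (f : (Int × Int) → Int) (hne : inp ≠ []) :
    (PySem.List.min? (inp.map f) (fun v => v)).getD 0 =
      f ((PySem.List.min? inp f).getD (0, 0)) := by
  obtain ⟨m, hm⟩ : ∃ m, PySem.List.min? inp f = some m := by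
    cases h : PySem.List.min? inp f
    · exact absurd ((PySem.List.min?_eq_none_iff _ _).mp h) hne
    · exact ⟨_, rfl⟩
  obtain ⟨v, hv⟩ : ∃ v, PySem.List.min? (inp.map f) (fun v => v) = some v := by
    cases h : PySem.List.min? (inp.map f) (fun v => v)
    · exact absurd (List.map_eq_nil_iff.1 ((PySem.List.min?_eq_none_iff _ _).mp h)) hne
    · exact ⟨_, rfl⟩
  rw [hm, hv]
  simp only [Option.getD_some]
  obtain ⟨y, hy, hvy⟩ := List.mem_map.1 (PySem.List.min?_mem hv)
  have h2 := PySem.List.min?_isMin hm y hy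
  have h3 := PySem.List.min?_isMin hv (f m) (List.mem_map_of_mem (PySem.List.min?_mem hm))
  exact le_antisymm h3 (hvy ▸ h2)

theorem pv_max_map (inp : List (Int × Int)) (f : (Int × Int) → Int) (hne : inp ≠ []) :
    (PySem.List.max? (inp.map f) (fun v => v)).getD 0 =
      f ((PySem.List.max? inp f).getD (0, 0)) := by
  obtain ⟨m, hm⟩ : ∃ m, PySem.List.max? inp f = some m := by
    cases h : PySem.List.max? inp f
    · exact absurd ((PySem.List.max?_eq_none_iff _ _).mp h) hne
    · exact ⟨_, rfl⟩
  obtain ⟨v, hv⟩ : ∃ v, PySem.List.max? (inp.map f) (fun v => v) = some v := by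
    cases h : PySem.List.max? (inp.map f) (fun v => v)
    · exact absurd (List.map_eq_nil_iff.1 ((PySem.List.max?_eq_none_iff _ _).mp h)) hne
    · exact ⟨_, rfl⟩
  rw [hm, hv]
  simp only [Option.getD_some]
  obtain ⟨y, hy, hvy⟩ := List.mem_map.1 (PySem.List.max?_mem hv)
  have h2 := PySem.List.max?_isMax hm y hy
  have h3 := PySem.List.max?_isMax hv (f m) (List.mem_map_of_mem (PySem.List.max?_mem hm))
  exact le_antisymm (hvy ▸ h2) h3

-- B's per-cell test as a predicate of the enumerate entry e and the cell c
theorem pv_cells_fold_dict (inp : List (Int × Int)) (xmin xmax ymin ymax : Int)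
    (d0 : PySem.Dict (Int × Int) Int) :
    (PySem.List.pyRange xmin xmax 1).foldl (fun d i =>
      (PySem.List.pyRange ymin ymax 1).foldl (fun d j =>
        d.modify ((PySem.List.min? inp
          (fun item => |item.1 - i| + |item.2 - j|)).getD (0, 0)) 0 (fun v => v + 1)) d) d0
    = ((pvCells xmin xmax ymin ymax).map (pvChosen inp)).foldl
        (fun d x => d.modify x 0 (fun v => v + 1)) d0 := by
  rw [List.foldl_map, pvCells, pv_foldl_flatMap]
  simp only [List.foldl_map, pvChosen, pvKey]

theorem pv_values_eq' {κ ν : Type} [BEq κ] [LawfulBEq κ] (d : PySem.Dict κ ν) (dflt : ν)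
    (h : d.keys.Nodup) : d.values = d.keys.map (fun k => d.getD k dflt) := by
  obtain ⟨l⟩ := d
  have hk : ({ items := l } : PySem.Dict κ ν).keys = l.map Prod.fst := by
    simp [PySem.Dict.keys]
  rw [hk] at h ⊢
  exact pv_values_eq l dflt h

theorem pvA_char (inp : List (Int × Int)) (xmin xmax ymin ymax : Int)
    (h1 : ((PySem.List.min? inp (fun item => item.1)).getD (0, 0)).1 = xmin)
    (h2 : ((PySem.List.max? inp (fun item => item.1)).getD (0, 0)).1 = xmax)
    (h3 : ((PySem.List.min? inp (fun item => item.2)).getD (0, 0)).2 = ymin)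
    (h4 : ((PySem.List.max? inp (fun item => item.2)).getD (0, 0)).2 = ymax) :
    part_one inp =
      (PySem.List.max?
        ((PySem.List.dedup ((pvCells xmin xmax ymin ymax).map (pvChosen inp))).map
          (fun p => ((((pvCells xmin xmax ymin ymax).map (pvChosen inp)).count p : Nat) : Int)))
        (fun v => v)).getD 0 := by
  subst h1; subst h2; subst h3; subst h4
  unfold part_one get_boundaries
  simp only []
  rw [pv_cells_fold_dict]
  congr 1
  set ps := (pvCells _ _ _ _).map (pvChosen inp) with hps
  set d : PySem.Dict (Int × Int) Int :=
    ps.foldl (fun d x => d.modify x 0 (fun v => v + 1)) PySem.Dict.empty with hd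
  have hkeys : d.keys = PySem.List.dedup ps := by
    rw [hd]
    have := PySem.Dict.keys_foldl_modify ps (0 : Int) (fun _ _ => fun v => v + 1)
      PySem.Dict.empty
    rw [this]
    rw [PySem.List.dedup_eq_ofList]
    rfl
  have hnodup : d.keys.Nodup := by rw [hkeys]; exact PySem.List.nodup_dedup ps
  have hget : ∀ p, d.getD p 0 = ((ps.count p : Nat) : Int) := by
    intro p
    rw [hd, PySem.Dict.getD_foldl_modify_add_one]
    simp [PySem.Dict.getD, PySem.Dict.get?, PySem.Dict.empty]
  rw [pv_values_eq' d 0 hnodup, hkeys]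
  congr 1
  exact List.map_congr_left (fun p _ => hget p)

-- encoded (distance, index) value of point k at cell c, as B computes it
def pvEnc (inp : List (Int × Int)) (c : Int × Int) (k : Nat) : Int :=
  pvKey c (inp.getD k (0, 0)) * inp.length + k

-- the merged grid value B ends up with at cell c: the minimum encoding over all points
def pvBestVal (inp : List (Int × Int)) (c : Int × Int) : Int :=
  (PySem.List.min? ((List.range inp.length).map (fun k => pvEnc inp c k)) (fun v => v)).getD 0

theorem pv_zipWith_diag {beta : Type} (f : Int → Int → Int) (g h : beta → Int)
    (l : List beta) :
    List.zipWith (fun a b => f (g a) (h b)) l l = l.map (fun a => f (g a) (h a)) := by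
  induction l with
  | nil => rfl
  | cons x t ih => simp

-- merging the per-point grids pointwise computes, at each cell, the running min
theorem pv_merge {alpha beta : Type} (es : List alpha) (cells : List beta)
    (g : alpha → beta → Int) (f0 : beta → Int) :
    es.foldl (fun b e => List.zipWith min b (cells.map (g e))) (cells.map f0)
      = cells.map (fun c => es.foldl (fun v e => min v (g e c)) (f0 c)) := by
  induction es generalizing f0 with
  | nil => rfl
  | cons e t ih =>
    simp only [List.foldl_cons]
    rw [List.zipWith_map, pv_zipWith_diag, ih]

theorem pv_merge_opt {alpha : Type} (es : List alpha) (grid : alpha → List Int)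
    (b0 : List Int) :
    es.foldl (fun b e => match b with
      | none => some (grid e)
      | some bb => some (List.zipWith min bb (grid e))) (some b0)
      = some (es.foldl (fun b e => List.zipWith min b (grid e)) b0) := by
  induction es generalizing b0 with
  | nil => rfl
  | cons e t ih => simp only [List.foldl_cons]; exact ih _

-- Python's `(a*n + k) % n = k` for 0 ≤ k < n
theorem pv_mod_decode (a n k : Int) (h0 : 0 ≤ k) (hk : k < n) :
    PySem.Int.mod (a * n + k) n = k := by
  have h0n : (0 : Int) ≤ n := by omega
  rw [PySem.Int.mod, Int.fmod_eq_emod, if_pos (Or.inl h0n), add_zero,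
      show a * n + k = k + a * n by ring, Int.add_mul_emod_self_right,
      Int.emod_eq_of_lt h0 hk]

-- the merged value at c encodes A's chosen point: its index n0 is the first argmin
theorem pv_best_spec (inp : List (Int × Int)) (c : Int × Int) (hne : inp ≠ []) :
    ∃ n0 : Nat, ∃ hn0 : n0 < inp.length,
      pvChosen inp c = inp[n0] ∧
      (∀ k (hk : k < n0), inp[k]'(by omega) ≠ inp[n0]) ∧
      pvBestVal inp c = pvEnc inp c n0 ∧
      (PySem.Int.mod (pvBestVal inp c) (PySem.List.len inp)).toNat = n0 := by
  cases hmo : PySem.List.min? inp (fun item => pvKey c item) with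
  | none => exact absurd ((PySem.List.min?_eq_none_iff _ _).mp hmo) hne
  | some m =>
    obtain ⟨pre, suf, heq2, hpre2, hsuf2⟩ := pv_min?_first (fun q => pvKey c q) inp m hmo
    have hn0 : pre.length < inp.length := by rw [heq2]; simp
    have hgetn0 : inp[pre.length] = m := by
      rw [List.getElem_of_eq heq2, List.getElem_append_right (le_refl _)]
      simp
    have hch : pvChosen inp c = inp[pre.length] := by
      rw [hgetn0]; simp [pvChosen, hmo]
    -- keys of earlier entries are strictly larger
    have hkey_lt : ∀ k (hk : k < pre.length), pvKey c m < pvKey c (inp[k]'(by omega)) := by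
      intro k hk
      have : inp[k]'(by omega) = pre[k]'hk := by
        rw [List.getElem_of_eq heq2]; exact List.getElem_append_left hk
      rw [this]
      exact hpre2 _ (List.getElem_mem hk)
    have hfirst : ∀ k (hk : k < pre.length), inp[k]'(by omega) ≠ inp[pre.length] := by
      intro k hk hcon
      rw [hgetn0] at hcon
      have := hkey_lt k hk
      rw [hcon] at this
      exact lt_irrefl _ this
    -- keys of later entries are at least as large
    have hkey_le : ∀ k (hk : k < inp.length), pre.length < k →
        pvKey c m ≤ pvKey c (inp[k]'hk) := by
      intro k hk hklt
      have hlen : k < pre.length + (suf.length + 1) := by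
        have h := hk; rw [heq2] at h; simpa using h
      have h1 : inp[k]'hk = (m :: suf)[k - pre.length]'(by
          simp only [List.length_cons]; omega) := by
        rw [List.getElem_of_eq heq2]
        exact List.getElem_append_right (by omega)
      rw [h1]
      have hmem : (m :: suf)[k - pre.length]'(by simp only [List.length_cons]; omega)
          ∈ m :: suf := List.getElem_mem _
      rcases List.mem_cons.1 hmem with heqm | hmem
      · rw [heqm]
      · exact hsuf2 _ hmem
    -- the encoding is strictly minimal at pre.length
    have henc_le : ∀ k, k < inp.length → pvEnc inp c pre.length ≤ pvEnc inp c k := by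
      intro k hk
      unfold pvEnc
      rw [List.getD_eq_getElem _ _ hk, List.getD_eq_getElem _ _ hn0, hgetn0]
      rcases Nat.lt_trichotomy k pre.length with hlt | rfl | hgt
      · have h1 := hkey_lt k hlt
        have h2 : (1 : Int) * (inp.length : Int) ≤
            (pvKey c (inp[k]'hk) - pvKey c m) * (inp.length : Int) :=
          mul_le_mul_of_nonneg_right (by omega) (by positivity)
        have h3 : ((pre.length : Int)) < (inp.length : Int) := by exact_mod_cast hn0
        nlinarith [Int.natCast_nonneg k]
      · rw [hgetn0]
      · have h1 := hkey_le k hk hgt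
        have h2 : (0 : Int) ≤ (pvKey c (inp[k]'hk) - pvKey c m) * (inp.length : Int) :=
          mul_nonneg (by omega) (by positivity)
        have h3 : ((pre.length : Int)) < (k : Int) := by exact_mod_cast hgt
        nlinarith
    -- the merged value equals the encoding at pre.length
    have hL_ne : (List.range inp.length).map (fun k => pvEnc inp c k) ≠ [] := by
      simp [List.map_eq_nil_iff, List.range_eq_nil]
      omega
    obtain ⟨v, hv⟩ : ∃ v, PySem.List.min?
        ((List.range inp.length).map (fun k => pvEnc inp c k)) (fun v => v) = some v := by
      cases h : PySem.List.min? ((List.range inp.length).map (fun k => pvEnc inp c k))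
          (fun v => v)
      · exact absurd ((PySem.List.min?_eq_none_iff _ _).mp h) hL_ne
      · exact ⟨_, rfl⟩
    have hval : pvBestVal inp c = pvEnc inp c pre.length := by
      rw [pvBestVal, hv, Option.getD_some]
      obtain ⟨k, hkmem, hkv⟩ := List.mem_map.1 (PySem.List.min?_mem hv)
      have hk := List.mem_range.1 hkmem
      have h1 := PySem.List.min?_isMin hv (pvEnc inp c pre.length)
        (List.mem_map_of_mem (List.mem_range.2 hn0))
      have h2 := henc_le k hk
      have h1' : v ≤ pvEnc inp c pre.length := by simpa using h1
      have h2' : pvEnc inp c pre.length ≤ v := hkv ▸ h2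
      exact le_antisymm h1' h2'
    refine ⟨pre.length, hn0, hch, hfirst, hval, ?_⟩
    rw [hval]
    unfold pvEnc
    rw [PySem.List.len_eq,
        pv_mod_decode _ _ _ (Int.natCast_nonneg _) (by exact_mod_cast hn0)]
    exact Int.toNat_natCast _

theorem pv_decode_chosen (inp : List (Int × Int)) (c : Int × Int) (hne : inp ≠ [])
    (k : Nat) (hk : k < inp.length)
    (h : (PySem.Int.mod (pvBestVal inp c) (PySem.List.len inp)).toNat = k) :
    pvChosen inp c = inp[k] := by
  obtain ⟨n0, hn0, hch, _, _, hdec⟩ := pv_best_spec inp c hne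
  rw [hdec] at h
  subst h
  exact hch

theorem pv_chosen_decode (inp : List (Int × Int)) (c : Int × Int) (hne : inp ≠ [])
    (k : Nat) (hk : k < inp.length)
    (hfirst : ∀ j (hj : j < k), inp[j]'(by omega) ≠ inp[k])
    (h : pvChosen inp c = inp[k]) :
    (PySem.Int.mod (pvBestVal inp c) (PySem.List.len inp)).toNat = k := by
  obtain ⟨n0, hn0, hch, hf0, _, hdec⟩ := pv_best_spec inp c hne
  rw [hdec]
  rcases Nat.lt_trichotomy n0 k with hlt | heq | hgt
  · exact absurd (hch.symm.trans h) (hfirst n0 hlt)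
  · exact heq
  · exact absurd (h.symm.trans hch) (hf0 k hgt)

-- the tally loop counts, per index, the merged cells decoding to it
theorem pv_tally (n : Int) (es : List Int) (t : List Int)
    (hin : ∀ e ∈ es, (PySem.Int.mod e n).toNat < t.length) :
    ∀ k, k < t.length →
      (es.foldl (fun t e =>
          t.set (PySem.Int.mod e n).toNat (t.getD (PySem.Int.mod e n).toNat 0 + 1)) t).getD k 0
        = t.getD k 0 + ((es.countP (fun e => (PySem.Int.mod e n).toNat == k) : Nat) : Int) := by
  induction es generalizing t with
  | nil => simp
  | cons e es ih =>
    intro k hk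
    simp only [List.foldl_cons, List.countP_cons]
    have hin' : ∀ e' ∈ es, (PySem.Int.mod e' n).toNat <
        (t.set (PySem.Int.mod e n).toNat (t.getD (PySem.Int.mod e n).toNat 0 + 1)).length := by
      intro e' he'
      rw [List.length_set]
      exact hin e' (List.mem_cons_of_mem _ he')
    have hset : ∀ k', k' < t.length →
        (t.set (PySem.Int.mod e n).toNat (t.getD (PySem.Int.mod e n).toNat 0 + 1)).getD k' 0
          = if (PySem.Int.mod e n).toNat = k' then t.getD k' 0 + 1 else t.getD k' 0 := by
      intro k' hk'
      rw [List.getD_eq_getElem _ _ (by simpa using hk'), List.getElem_set,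
          List.getD_eq_getElem _ _ hk']
      split_ifs with h
      · subst h; rw [List.getD_eq_getElem _ _ hk']
      · rfl
    rw [ih _ hin' k (by simpa using hk), hset k hk]
    by_cases hek : (PySem.Int.mod e n).toNat = k
    · simp [hek]; ring
    · simp [hek]

theorem pv_tally_length (n : Int) (es : List Int) (t : List Int) :
    (es.foldl (fun t e =>
        t.set (PySem.Int.mod e n).toNat (t.getD (PySem.Int.mod e n).toNat 0 + 1)) t).length
      = t.length := by
  induction es generalizing t with
  | nil => rfl
  | cons e es ih => simp only [List.foldl_cons]; rw [ih]; exact List.length_set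

-- B's per-point grid is the cell list mapped through the encoding of that point
theorem pv_grid_eq (inp : List (Int × Int)) (xmin xmax ymin ymax : Int)
    (e : Int × (Int × Int)) :
    ((PySem.List.pyRange xmin xmax 1).flatMap (fun i =>
        ((PySem.List.pyRange ymin ymax 1).map
          (fun j => |e.2.2 - j| * PySem.List.len inp + e.1)).map
          (fun d => |e.2.1 - i| * PySem.List.len inp + d)))
      = (pvCells xmin xmax ymin ymax).map (fun c =>
          |e.2.1 - c.1| * PySem.List.len inp + (|e.2.2 - c.2| * PySem.List.len inp + e.1)) := by
  rw [pvCells, List.map_flatMap]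
  simp only [List.map_map]
  rfl


theorem pv_enum_map (inp : List (Int × Int)) (c : Int × Int) :
    (PySem.List.enumerate inp 0).map (fun e =>
        |e.2.1 - c.1| * PySem.List.len inp + (|e.2.2 - c.2| * PySem.List.len inp + e.1))
      = (List.range inp.length).map (fun k => pvEnc inp c k) := by
  rw [PySem.List.enumerate_eq_map_pyRange inp ((0, 0) : Int × Int), List.map_map,
      PySem.List.pyRange_one]
  rw [show ((PySem.List.len inp - 0)).toNat = inp.length by simp [PySem.List.len_eq]]
  rw [List.map_map]
  apply List.map_congr_left
  intro k _
  simp only [Function.comp, zero_add, PySem.List.pyGetD_natCast]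
  unfold pvEnc pvKey
  rw [PySem.List.len_eq]
  ring

-- the whole merge loop: B's best list is the cells mapped through pvBestVal
theorem pv_enumerate_fold (inp : List (Int × Int)) (z : Int × Int)
    (rest : List (Int × Int)) (hinp : inp = z :: rest) (xmin xmax ymin ymax : Int) :
    (PySem.List.enumerate inp 0).foldl (fun best e =>
      match best with
      | none => some ((PySem.List.pyRange xmin xmax 1).flatMap (fun i =>
          ((PySem.List.pyRange ymin ymax 1).map
            (fun j => |e.2.2 - j| * PySem.List.len inp + e.1)).map
            (fun d => |e.2.1 - i| * PySem.List.len inp + d)))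
      | some b => some (List.zipWith min b
          ((PySem.List.pyRange xmin xmax 1).flatMap (fun i =>
          ((PySem.List.pyRange ymin ymax 1).map
            (fun j => |e.2.2 - j| * PySem.List.len inp + e.1)).map
            (fun d => |e.2.1 - i| * PySem.List.len inp + d))))) none
      = some ((pvCells xmin xmax ymin ymax).map (pvBestVal inp)) := by
  have hgrid := pv_grid_eq inp xmin xmax ymin ymax
  simp only [hgrid]
  subst hinp
  rw [show PySem.List.enumerate (z :: rest) 0
      = ((0 : Int), z) :: PySem.List.enumerate rest 1 by simp [PySem.List.enumerate]]
  rw [List.foldl_cons]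
  simp only []
  rw [pv_merge_opt, pv_merge]
  congr 1
  apply List.map_congr_left
  intro c _
  have hL : (List.range (z :: rest).length).map (fun k => pvEnc (z :: rest) c k)
      = (fun e => |e.2.1 - c.1| * PySem.List.len (z :: rest)
          + (|e.2.2 - c.2| * PySem.List.len (z :: rest) + e.1)) ((0 : Int), z)
        :: (PySem.List.enumerate rest 1).map (fun e =>
          |e.2.1 - c.1| * PySem.List.len (z :: rest)
          + (|e.2.2 - c.2| * PySem.List.len (z :: rest) + e.1)) := by
    rw [← pv_enum_map (z :: rest) c]
    rw [show PySem.List.enumerate (z :: rest) 0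
        = ((0 : Int), z) :: PySem.List.enumerate rest 1 by simp [PySem.List.enumerate]]
    rfl
  rw [pvBestVal, hL, PySem.List.min?_id_cons, Option.getD_some, List.foldl_map]

theorem pvB_char (inp : List (Int × Int)) (xmin xmax ymin ymax : Int) (hne : inp ≠ [])
    (h1 : ((PySem.List.min? inp (fun item => item.1)).getD (0, 0)).1 = xmin)
    (h2 : ((PySem.List.max? inp (fun item => item.1)).getD (0, 0)).1 = xmax)
    (h3 : ((PySem.List.min? inp (fun item => item.2)).getD (0, 0)).2 = ymin)
    (h4 : ((PySem.List.max? inp (fun item => item.2)).getD (0, 0)).2 = ymax) :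
    part_one_alt inp =
      (PySem.List.max?
        (((pvCells xmin xmax ymin ymax).map (pvBestVal inp)).foldl (fun t e =>
            t.set (PySem.Int.mod e (PySem.List.len inp)).toNat
              (t.getD (PySem.Int.mod e (PySem.List.len inp)).toNat 0 + 1))
          (List.replicate inp.length (0 : Int)))
        (fun v => v)).getD 0 := by
  subst h1; subst h2; subst h3; subst h4
  obtain ⟨z, rest, rfl⟩ : ∃ z rest, inp = z :: rest := by
    cases inp with
    | nil => exact absurd rfl hne
    | cons z rest => exact ⟨z, rest, rfl⟩
  unfold part_one_alt
  simp only []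
  rw [pv_min_map _ (fun p => p.1) hne, pv_max_map _ (fun p => p.1) hne,
      pv_min_map _ (fun p => p.2) hne, pv_max_map _ (fun p => p.2) hne]
  rw [pv_enumerate_fold (z :: rest) z rest rfl
    (((PySem.List.min? (z :: rest) (fun item => item.1)).getD (0, 0)).1)
    (((PySem.List.max? (z :: rest) (fun item => item.1)).getD (0, 0)).1)
    (((PySem.List.min? (z :: rest) (fun item => item.2)).getD (0, 0)).2)
    (((PySem.List.max? (z :: rest) (fun item => item.2)).getD (0, 0)).2)]
  simp only [Option.getD_some]

theorem part_one_eq (inp : List (Int × Int)) (hpre : Pre_part_one inp) :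
    part_one inp = part_one_alt inp := by
  obtain ⟨⟨a, ha, b, hb, hab⟩, ⟨a2, ha2, b2, hb2, hab2⟩⟩ := hpre
  have hne : inp ≠ [] := by rintro rfl; simp at ha
  have hlen_pos : 0 < inp.length := List.length_pos_iff.2 hne
  set xmin := ((PySem.List.min? inp (fun item => item.1)).getD (0, 0)).1 with hxmin
  set xmax := ((PySem.List.max? inp (fun item => item.1)).getD (0, 0)).1 with hxmax
  set ymin := ((PySem.List.min? inp (fun item => item.2)).getD (0, 0)).2 with hymin
  set ymax := ((PySem.List.max? inp (fun item => item.2)).getD (0, 0)).2 with hymax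
  -- the grid is nonempty
  have hxlt : xmin < xmax := by
    obtain ⟨mx, hmx⟩ : ∃ m, PySem.List.min? inp (fun item => item.1) = some m := by
      cases h : PySem.List.min? inp (fun item => item.1)
      · exact absurd ((PySem.List.min?_eq_none_iff _ _).mp h) hne
      · exact ⟨_, rfl⟩
    obtain ⟨Mx, hMx⟩ : ∃ m, PySem.List.max? inp (fun item => item.1) = some m := by
      cases h : PySem.List.max? inp (fun item => item.1)
      · exact absurd ((PySem.List.max?_eq_none_iff _ _).mp h) hne
      · exact ⟨_, rfl⟩
    have h1 := PySem.List.min?_isMin hmx a ha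
    have h2 := PySem.List.max?_isMax hMx b hb
    rw [hxmin, hxmax, hmx, hMx]
    simp only [Option.getD_some]
    omega
  have hylt : ymin < ymax := by
    obtain ⟨mx, hmx⟩ : ∃ m, PySem.List.min? inp (fun item => item.2) = some m := by
      cases h : PySem.List.min? inp (fun item => item.2)
      · exact absurd ((PySem.List.min?_eq_none_iff _ _).mp h) hne
      · exact ⟨_, rfl⟩
    obtain ⟨Mx, hMx⟩ : ∃ m, PySem.List.max? inp (fun item => item.2) = some m := by
      cases h : PySem.List.max? inp (fun item => item.2)
      · exact absurd ((PySem.List.max?_eq_none_iff _ _).mp h) hne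
      · exact ⟨_, rfl⟩
    have h1 := PySem.List.min?_isMin hmx a2 ha2
    have h2 := PySem.List.max?_isMax hMx b2 hb2
    rw [hymin, hymax, hmx, hMx]
    simp only [Option.getD_some]
    omega
  rw [pvA_char inp xmin xmax ymin ymax rfl rfl rfl rfl,
      pvB_char inp xmin xmax ymin ymax hne rfl rfl rfl rfl]
  set cells := pvCells xmin xmax ymin ymax with hcells
  set ps := cells.map (pvChosen inp) with hps
  set bestL := cells.map (pvBestVal inp) with hbestL
  have hcell0 : ((xmin, ymin) : Int × Int) ∈ cells := by
    rw [hcells, pvCells]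
    exact List.mem_flatMap.2 ⟨xmin, PySem.List.mem_pyRange_one.2 ⟨le_refl _, hxlt⟩,
      List.mem_map_of_mem (PySem.List.mem_pyRange_one.2 ⟨le_refl _, hylt⟩)⟩
  have hps_ne : ps ≠ [] := by
    rw [hps]
    intro h
    rw [List.map_eq_nil_iff] at h
    rw [h] at hcell0
    simp at hcell0
  have hchosen_mem : ∀ c, pvChosen inp c ∈ inp := by
    intro c
    cases hmo : PySem.List.min? inp (fun item => pvKey c item) with
    | none => exact absurd ((PySem.List.min?_eq_none_iff _ _).mp hmo) hne
    | some m =>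
      have := PySem.List.min?_mem hmo
      simpa [pvChosen, hmo] using this
  -- the tally list
  set tstep : List Int → Int → List Int := fun t e =>
    t.set (PySem.Int.mod e (PySem.List.len inp)).toNat
      (t.getD (PySem.Int.mod e (PySem.List.len inp)).toNat 0 + 1) with htstep
  set tally := bestL.foldl tstep (List.replicate inp.length (0 : Int)) with htally
  have hdecode_lt : ∀ e ∈ bestL, (PySem.Int.mod e (PySem.List.len inp)).toNat < inp.length := by
    intro e he
    rw [hbestL] at he
    obtain ⟨c, _, rfl⟩ := List.mem_map.1 he
    obtain ⟨n0, hn0, _, _, _, hdec⟩ := pv_best_spec inp c hne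
    rw [hdec]
    exact hn0
  have htlen : tally.length = inp.length := by
    rw [htally, htstep, pv_tally_length, List.length_replicate]
  have htallyD : ∀ k, k < inp.length →
      tally.getD k 0 = ((bestL.countP
        (fun e => (PySem.Int.mod e (PySem.List.len inp)).toNat == k) : Nat) : Int) := by
    intro k hk
    rw [htally, htstep, pv_tally _ _ _ (by
        intro e he
        rw [List.length_replicate]
        exact hdecode_lt e he) k (by rw [List.length_replicate]; exact hk)]
    rw [List.getD_replicate _ hk]
    ring
  -- per-index counts over cells
  have hcountB : ∀ k : Nat, bestL.countP
      (fun e => (PySem.Int.mod e (PySem.List.len inp)).toNat == k)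
      = cells.countP (fun c =>
          (PySem.Int.mod (pvBestVal inp c) (PySem.List.len inp)).toNat == k) := by
    intro k
    rw [hbestL, List.countP_map]
    rfl
  cases hLA : (PySem.List.dedup ps).map (fun p => ((ps.count p : Nat) : Int)) with
  | nil =>
    exfalso
    rw [List.map_eq_nil_iff] at hLA
    obtain ⟨p0, hp0⟩ := List.exists_mem_of_ne_nil ps hps_ne
    have : p0 ∈ PySem.List.dedup ps := (PySem.List.mem_dedup ps p0).2 hp0
    rw [hLA] at this
    simp at this
  | cons v t =>
    cases htl : tally with
    | nil =>
      exfalso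
      rw [htl] at htlen
      simp at htlen
      omega
    | cons v' t' =>
      rw [PySem.List.max?_id_cons, PySem.List.max?_id_cons]
      simp only [Option.getD_some]
      have hLA_nonneg : ∀ y ∈ v :: t, (0 : Int) ≤ y := by
        rw [← hLA]
        rintro y hy
        obtain ⟨p, _, rfl⟩ := List.mem_map.1 hy
        exact Int.natCast_nonneg _
      have hMA_mem : t.foldl max v ∈ v :: t := by
        rcases PySem.List.foldl_max_mem t v with h | h
        · rw [h]; exact List.mem_cons_self
        · exact List.mem_cons_of_mem _ h
      have hMA_ub : ∀ y ∈ v :: t, y ≤ t.foldl max v := by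
        intro y hy
        rcases List.mem_cons.1 hy with rfl | hy
        · exact (PySem.List.le_foldl_max t y).1
        · exact (PySem.List.le_foldl_max t v).2 y hy
      have hMA_nonneg : (0 : Int) ≤ t.foldl max v :=
        le_trans (hLA_nonneg v List.mem_cons_self) ((PySem.List.le_foldl_max t v).1)
      have hMB_mem : t'.foldl max v' ∈ v' :: t' := by
        rcases PySem.List.foldl_max_mem t' v' with h | h
        · rw [h]; exact List.mem_cons_self
        · exact List.mem_cons_of_mem _ h
      have hMB_ub : ∀ y ∈ v' :: t', y ≤ t'.foldl max v' := by
        intro y hy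
        rcases List.mem_cons.1 hy with rfl | hy
        · exact (PySem.List.le_foldl_max t' y).1
        · exact (PySem.List.le_foldl_max t' v').2 y hy
      -- every tally entry is at most A's answer
      have hG1 : ∀ y ∈ v' :: t', y ≤ t.foldl max v := by
        intro y hy
        rw [← htl] at hy
        obtain ⟨k, hk, hky⟩ := List.mem_iff_getElem.1 hy
        have hk' : k < inp.length := htlen ▸ hk
        have hyval : y = ((cells.countP (fun c =>
            (PySem.Int.mod (pvBestVal inp c) (PySem.List.len inp)).toNat == k) : Nat) : Int) := by
          rw [← hky, ← List.getD_eq_getElem _ 0 hk, htallyD k hk', hcountB]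
        by_cases hz : cells.countP (fun c =>
            (PySem.Int.mod (pvBestVal inp c) (PySem.List.len inp)).toNat == k) = 0
        · rw [hyval, hz]
          simpa using hMA_nonneg
        · have hpos : 0 < cells.countP (fun c =>
              (PySem.Int.mod (pvBestVal inp c) (PySem.List.len inp)).toNat == k) :=
            Nat.pos_of_ne_zero hz
          obtain ⟨c, hc, hpc⟩ := List.countP_pos_iff.1 hpos
          have hch : pvChosen inp c = inp[k] :=
            pv_decode_chosen inp c hne k hk' (by simpa using hpc)
          have hmem : inp[k] ∈ ps := hch ▸ List.mem_map_of_mem hc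
          have hle : cells.countP (fun c =>
              (PySem.Int.mod (pvBestVal inp c) (PySem.List.len inp)).toNat == k)
              ≤ ps.count (inp[k]) := by
            rw [List.count_eq_countP, hps, List.countP_map]
            apply List.countP_mono_left
            intro c' _ hp'
            have : pvChosen inp c' = inp[k] :=
              pv_decode_chosen inp c' hne k hk' (by simpa using hp')
            simpa [Function.comp] using this
          have hcount_mem : ((ps.count (inp[k]) : Nat) : Int) ∈ v :: t := by
            rw [← hLA]
            exact List.mem_map_of_mem ((PySem.List.mem_dedup ps _).2 hmem)
          calc y = _ := hyval
            _ ≤ ((ps.count (inp[k]) : Nat) : Int) := by exact_mod_cast hle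
            _ ≤ t.foldl max v := hMA_ub _ hcount_mem
      -- every A value is at most B's answer
      have hG2 : ∀ y ∈ v :: t, y ≤ t'.foldl max v' := by
        intro y hy
        rw [← hLA] at hy
        obtain ⟨p, hp, rfl⟩ := List.mem_map.1 hy
        have hpps : p ∈ ps := (PySem.List.mem_dedup ps p).1 hp
        obtain ⟨c, hc, hchosen⟩ := List.mem_map.1 hpps
        have hpinp : p ∈ inp := hchosen ▸ hchosen_mem c
        obtain ⟨k, hk, hgk, hfir⟩ := pv_first_idx hpinp
        have hfir' : ∀ j (hj : j < k), inp[j]'(by omega) ≠ inp[k] := by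
          intro j hj
          rw [hgk]
          exact hfir j hj
        have hcongr : ps.count p = cells.countP (fun c =>
            (PySem.Int.mod (pvBestVal inp c) (PySem.List.len inp)).toNat == k) := by
          rw [List.count_eq_countP, hps, List.countP_map]
          apply List.countP_congr
          intro c' _
          constructor
          · intro h
            have hch' : pvChosen inp c' = inp[k] := by
              rw [hgk]
              simpa [Function.comp] using h
            have := pv_chosen_decode inp c' hne k hk hfir' hch'
            simpa using this
          · intro h
            have := pv_decode_chosen inp c' hne k hk (by simpa using h)
            rw [hgk] at this
            simpa [Function.comp] using this
        have hentry : ((cells.countP (fun c =>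
            (PySem.Int.mod (pvBestVal inp c) (PySem.List.len inp)).toNat == k) : Nat) : Int)
            ∈ v' :: t' := by
          rw [← htl]
          have hklt : k < tally.length := htlen ▸ hk
          have := List.getElem_mem hklt
          rwa [← List.getD_eq_getElem _ 0 hklt, htallyD k hk, hcountB] at this
        calc ((ps.count p : Nat) : Int)
            = ((cells.countP (fun c =>
                (PySem.Int.mod (pvBestVal inp c) (PySem.List.len inp)).toNat == k)
                : Nat) : Int) := by exact_mod_cast hcongr
          _ ≤ t'.foldl max v' := hMB_ub _ hentry
      exact le_antisymm (hG2 _ hMA_mem) (hG1 _ hMB_mem)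

-- ===== VERDICT (by name: the statement is the Claim_ definition above) =====
theorem part_one_spec : Claim_equal_part_one :=
  fun inp _ hpre => part_one_eq inp hpre

theorem part_one_raises : Claim_raises_part_one := by
  unfold Claim_raises_part_one
  constructor
  · intro inp _ hr hp
    rcases hr with ⟨_, h | h⟩
    · exact h hp.1
    · exact h hp.2
  · refine ⟨by decide, ?_, by decide⟩
    unfold Raises_part_one
    constructor
    · decide
    · left; decide

-- self-check: the raises witness really lies inside Raises_ and outside Pre_
theorem part_one_raises_ok :
    Raises_part_one pvRaiseWitness_part_one ∧ ¬ Pre_part_one pvRaiseWitness_part_one :=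
  ⟨part_one_raises.2.2.1, part_one_raises.1 pvRaiseWitness_part_one (by decide) part_one_raises.2.2.1⟩
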